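-- pv_equiv track=rewrite | github.com/ChipCracker/CLaRA | src/clara/extract.py | _find_unescaped_percent
-- ===== SOURCE A (Python) =====
-- def _find_unescaped_percent(line: str) -> int:
--     i = 0
--     while True:
--         idx = line.find("%", i)
--         if idx == -1:
--             return -1
--         if idx > 0 and line[idx - 1] == "\\":
--             i = idx + 1
--             continue
--         return idx
-- ===== SOURCE B (Python) =====
-- def _find_unescaped_percent(line: str) -> int:
--     prev = None
--     for i, ch in enumerate(line):
--         if ch == "%" and prev != "\\":
--             return i
--         prev = ch
--     return -1
-- ===== Notes on version B (the rewrite author's own statement) =====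
-- stated objective: simpler
-- what changed: Replaced the repeated str.find/skip loop (restart find after each escaped match) with a single left-to-right character scan that tracks the previous character and returns the first '%' whose predecessor is not a backslash.
import Mathlib
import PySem

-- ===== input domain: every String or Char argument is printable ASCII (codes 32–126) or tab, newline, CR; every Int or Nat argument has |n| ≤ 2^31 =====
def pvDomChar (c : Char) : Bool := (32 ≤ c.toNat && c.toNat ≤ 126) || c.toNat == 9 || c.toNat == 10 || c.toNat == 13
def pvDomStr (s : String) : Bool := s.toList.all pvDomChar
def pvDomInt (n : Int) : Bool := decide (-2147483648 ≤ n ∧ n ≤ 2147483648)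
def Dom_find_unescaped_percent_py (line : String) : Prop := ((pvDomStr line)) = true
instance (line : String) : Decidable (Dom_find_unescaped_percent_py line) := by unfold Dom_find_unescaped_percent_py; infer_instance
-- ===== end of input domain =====

-- B replaces A's repeated find/skip loop with a single character scan tracking the
-- previous character (objective: simpler); both are linear, no speed claim.

-- ===== PORT A =====
-- helper lemma cited below: str.find(sub, start) is -1 when start is past the end
theorem pvFindFrom_gt_len (s sub : List Char) (k : Nat) (h : s.length < k) :
    PySem.Chars.findFrom s sub (k : Int) none = -1 := by
  simp only [PySem.Chars.findFrom]
  have h1 : ¬ ((k : Int) < 0) := by omega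
  have h2 : ((s.length : Int)) < (k : Int) := by exact_mod_cast h
  simp [h1, h2]

-- the 'while True' loop of A, with the loop variable i; idx = line.find("%", i)
def pvALoop (line : String) (i : Nat) : Int :=
  if h1 : PySem.Str.findFrom line "%" (i : Int) none = -1 then -1
  else if h2 : 0 < PySem.Str.findFrom line "%" (i : Int) none ∧
      PySem.Str.pyGet? line (PySem.Str.findFrom line "%" (i : Int) none - 1) = some '\\' then
    pvALoop line ((PySem.Str.findFrom line "%" (i : Int) none).toNat + 1)
  else
    PySem.Str.findFrom line "%" (i : Int) none
termination_by line.toList.length + 1 - i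
decreasing_by
  have hi : i ≤ line.toList.length := by
    by_contra hgt
    push_neg at hgt
    exact h1 (by simpa [PySem.Str.findFrom] using pvFindFrom_gt_len line.toList "%".toList i hgt)
  have hne : PySem.Chars.findFrom line.toList "%".toList (i : Int) none ≠ -1 := by
    simpa [PySem.Str.findFrom] using h1
  have hs := PySem.Chars.findFrom_natCast_spec line.toList "%".toList i hi hne
  have hlen := List.IsPrefix.length_le hs.2.1
  rw [List.length_drop] at hlen
  have heq : PySem.Str.findFrom line "%" (i : Int) none
      = PySem.Chars.findFrom line.toList "%".toList (i : Int) none := rfl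
  rw [heq]
  omega

def find_unescaped_percent_py (line : String) : Int := pvALoop line 0

-- ===== PORT B =====
-- B's for-loop over enumerate(line): prev is the previous character (none at the start)
def pvBLoop : List Char → Option Char → Nat → Int
  | [], _, _ => -1
  | c :: cs, prev, i => if c = '%' ∧ prev ≠ some '\\' then (i : Int) else pvBLoop cs (some c) (i + 1)

def find_unescaped_percent_py_alt (line : String) : Int := pvBLoop line.toList none 0

-- ===== PRECONDITION & SPEC =====
def Spec_find_unescaped_percent_py (line : String) (out : Int) : Prop := out = find_unescaped_percent_py_alt line
instance (line : String) (out : Int) : Decidable (Spec_find_unescaped_percent_py line out) := by unfold Spec_find_unescaped_percent_py; infer_instance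

-- ===== CLAIM (what is proved, stated in full; the proofs are below) =====
def Claim_equal_find_unescaped_percent_py : Prop := ∀ (line : String), Dom_find_unescaped_percent_py line → Spec_find_unescaped_percent_py line (find_unescaped_percent_py line)

-- ===== LEMMAS AND PROOFS =====

-- common characterisation: first j ≥ start with cs[j] = '%' not preceded by '\'
def pvFirst (cs : List Char) (j : Nat) : Int :=
  if h : j < cs.length then
    if cs[j] = '%' ∧ (j = 0 ∨ cs[j - 1]? ≠ some '\\') then (j : Int)
    else pvFirst cs (j + 1)
  else -1
termination_by cs.length - j

theorem pvSingleton_prefix_iff (a : Char) (l : List Char) : [a] <+: l ↔ l.head? = some a := by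
  cases l with
  | nil => simp
  | cons x xs =>
    simp [List.cons_prefix_cons, eq_comm]

theorem pvPrefix_drop_iff (cs : List Char) (j : Nat) (a : Char) :
    [a] <+: cs.drop j ↔ cs[j]? = some a := by
  rw [pvSingleton_prefix_iff, List.head?_drop]

-- B's loop computes pvFirst
theorem pvBLoop_eq_pvFirst (cs : List Char) : ∀ j, j ≤ cs.length →
    pvBLoop (cs.drop j) (if j = 0 then none else cs[j - 1]?) j = pvFirst cs j := by
  intro j
  induction hn : cs.length - j using Nat.strong_induction_on generalizing j with
  | _ n ih =>
    intro hj
    by_cases hlt : j < cs.length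
    · rw [List.drop_eq_getElem_cons hlt]
      rw [pvFirst]
      simp only [hlt, dif_pos]
      have hguard : ((if j = 0 then none else cs[j - 1]?) ≠ some '\\') ↔ (j = 0 ∨ cs[j - 1]? ≠ some '\\') := by
        by_cases h0 : j = 0 <;> simp [h0]
      by_cases hc : cs[j] = '%' ∧ (j = 0 ∨ cs[j - 1]? ≠ some '\\')
      · rw [pvBLoop]
        rw [if_pos (by exact ⟨hc.1, hguard.mpr hc.2⟩), if_pos hc]
      · rw [pvBLoop]
        rw [if_neg (by rw [hguard]; exact hc), if_neg hc]
        have hprev : some cs[j] = (if j + 1 = 0 then none else cs[(j + 1) - 1]?) := by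
          simp [List.getElem?_eq_getElem hlt]
        rw [hprev]
        exact ih (cs.length - (j + 1)) (by omega) (j + 1) rfl (by omega)
    · have : cs.length ≤ j := by omega
      rw [List.drop_eq_nil_of_le this, pvFirst]
      simp [hlt, pvBLoop]

-- pvFirst is unchanged while skipping positions that are not '%'
theorem pvFirst_skip (cs : List Char) : ∀ i k, i ≤ k → k ≤ cs.length →
    (∀ j, i ≤ j → j < k → cs[j]? ≠ some '%') → pvFirst cs i = pvFirst cs k := by
  intro i k
  induction hn : k - i using Nat.strong_induction_on generalizing i with
  | _ n ih =>
    intro hik hk hno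
    rcases Nat.eq_or_lt_of_le hik with rfl | hlt
    · rfl
    · have hilen : i < cs.length := by omega
      rw [pvFirst]
      have hnp : ¬ (cs[i] = '%' ∧ (i = 0 ∨ cs[i - 1]? ≠ some '\\')) := by
        intro h
        exact hno i le_rfl hlt (by rw [List.getElem?_eq_getElem hilen, h.1])
      rw [dif_pos hilen, if_neg hnp]
      exact ih (k - (i + 1)) (by omega) (i + 1) rfl hlt hk (fun j h1 h2 => hno j (by omega) h2)

-- pvFirst is -1 when there is no '%' at or after i
theorem pvFirst_none (cs : List Char) : ∀ i, (∀ j, i ≤ j → cs[j]? ≠ some '%') → pvFirst cs i = -1 := by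
  intro i
  induction hn : cs.length - i using Nat.strong_induction_on generalizing i with
  | _ n ih =>
    intro hno
    rw [pvFirst]
    by_cases hlt : i < cs.length
    · have hnp : ¬ (cs[i] = '%' ∧ (i = 0 ∨ cs[i - 1]? ≠ some '\\')) := by
        intro h
        exact hno i le_rfl (by rw [List.getElem?_eq_getElem hlt, h.1])
      rw [dif_pos hlt, if_neg hnp]
      exact ih (cs.length - (i + 1)) (by omega) (i + 1) rfl (fun j h1 => hno j (by omega))
    · rw [dif_neg hlt]

-- A's loop computes pvFirst
theorem pvALoop_eq_pvFirst (line : String) : ∀ i, i ≤ line.toList.length →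
    pvALoop line i = pvFirst line.toList i := by
  intro i
  induction hn : line.toList.length + 1 - i using Nat.strong_induction_on generalizing i with
  | _ n ih =>
    intro hi
    rw [pvALoop]
    by_cases h1 : PySem.Str.findFrom line "%" (i : Int) none = -1
    · rw [dif_pos h1]
      have hno : ¬ ("%".toList <:+: line.toList.drop i) := by
        rw [← PySem.Chars.findFrom_natCast_eq_neg_one_iff line.toList "%".toList i hi]
        simpa [PySem.Str.findFrom] using h1
      refine (pvFirst_none line.toList i fun j hj hc => hno ?_).symm
      have hp : ['%'] <+: line.toList.drop j := (pvPrefix_drop_iff _ _ _).mpr hc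
      show ['%'] <:+: line.toList.drop i
      have hdd : (line.toList.drop i).drop (j - i) = line.toList.drop j := by
        rw [List.drop_drop]; congr 1; omega
      exact hp.isInfix.trans (hdd ▸ (List.drop_suffix (j - i) (line.toList.drop i)).isInfix)
    · rw [dif_neg h1]
      have hs := PySem.Chars.findFrom_natCast_spec line.toList "%".toList i hi
        (by simpa [PySem.Str.findFrom] using h1)
      set idx := PySem.Str.findFrom line "%" (i : Int) none with hidx
      have hsf : PySem.Chars.findFrom line.toList "%".toList (i : Int) none = idx := by
        simp [hidx, PySem.Str.findFrom]
      rw [hsf] at hs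
      have hnonneg : (0 : Int) ≤ idx := le_trans (by omega) hs.1
      have hat : line.toList[idx.toNat]? = some '%' := (pvPrefix_drop_iff _ _ _).mp hs.2.1
      have hatlt : idx.toNat < line.toList.length := (List.getElem?_eq_some_iff.mp hat).1
      have hmin : ∀ j, i ≤ j → j < idx.toNat → line.toList[j]? ≠ some '%' := by
        intro j hj1 hj2 hc
        exact hs.2.2 j hj1 hj2 ((pvPrefix_drop_iff _ _ _).mpr hc)
      have hitoid : i ≤ idx.toNat := by omega
      have hskip : pvFirst line.toList i = pvFirst line.toList idx.toNat :=
        pvFirst_skip line.toList i idx.toNat hitoid (by omega) hmin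
      by_cases h2 : 0 < idx ∧ PySem.Str.pyGet? line (idx - 1) = some '\\'
      · rw [dif_pos h2]
        have hprev : line.toList[idx.toNat - 1]? = some '\\' := by
          have hq := h2.2
          have h21 := h2.1
          rw [PySem.Str.pyGet?, PySem.Chars.pyGet?] at hq
          rw [PySem.List.pyGet?_of_nonneg _ (show (0:Int) ≤ idx - 1 by omega)] at hq
          rwa [show (idx - 1).toNat = idx.toNat - 1 by omega] at hq
        have hg : ¬ (line.toList[idx.toNat]'hatlt = '%' ∧ (idx.toNat = 0 ∨ line.toList[idx.toNat - 1]? ≠ some '\\')) := by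
          rintro ⟨-, h0 | hne⟩
          · omega
          · exact hne hprev
        rw [hskip, pvFirst, dif_pos hatlt, if_neg hg]
        exact ih (line.toList.length + 1 - (idx.toNat + 1)) (by omega) (idx.toNat + 1) rfl (by omega)
      · rw [dif_neg h2]
        have hg : line.toList[idx.toNat]'hatlt = '%' ∧ (idx.toNat = 0 ∨ line.toList[idx.toNat - 1]? ≠ some '\\') := by
          refine ⟨by simpa [List.getElem?_eq_getElem hatlt] using hat, ?_⟩
          push_neg at h2
          by_cases h0 : idx.toNat = 0
          · exact Or.inl h0
          · right
            have hpos : 0 < idx := by omega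
            have hb := h2 hpos
            intro hc
            apply hb
            show PySem.Str.pyGet? line (idx - 1) = some '\\'
            rw [PySem.Str.pyGet?, PySem.Chars.pyGet?]
            rw [PySem.List.pyGet?_of_nonneg _ (show (0:Int) ≤ idx - 1 by omega)]
            rwa [show (idx - 1).toNat = idx.toNat - 1 by omega]
        rw [hskip, pvFirst, dif_pos hatlt, if_pos hg]
        omega

-- ===== VERDICT (by name: the statement is the Claim_ definition above) =====
theorem find_unescaped_percent_py_spec : Claim_equal_find_unescaped_percent_py := by
  intro line _
  unfold Spec_find_unescaped_percent_py find_unescaped_percent_py find_unescaped_percent_py_alt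
  rw [pvALoop_eq_pvFirst line 0 (by omega)]
  rw [← pvBLoop_eq_pvFirst line.toList 0 (by omega)]
  simp
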